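-- pv_equiv track=rewrite | github.com/cobradeca-a11y/cpp_mvp | backend/association_engine.py | measure_association_status
-- ===== SOURCE A (Python) =====
-- from typing import Any
--
-- BLOCKED_NO_SYSTEM_STATUS = "blocked_no_system_association"
--
-- def measure_association_status(associations: list[dict[str, Any]]) -> str:
--     if not associations:
--         return "no_ocr_regions"
--     if all(item.get("association_status") == BLOCKED_NO_SYSTEM_STATUS for item in associations):
--         return "blocked_no_system_association"
--     if all(str(item.get("association_status", "")).startswith("blocked_") for item in associations):
--         return "blocked_no_reliable_measure_geometry"
--     if any(item.get("association_status") == "assigned_to_measure" for item in associations):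
--         return "partially_assigned"
--     return "unassigned_pending_geometry_or_review"
-- ===== SOURCE B (Python) =====
-- # B: one pass classifying each item into a category bit (no-system / blocked / assigned / other),
-- # OR-ing the bits into a mask, then reading the label off the mask.
-- BLOCKED_NO_SYSTEM_STATUS = "blocked_no_system_association"
--
-- def measure_association_status(associations):
--     if not associations:
--         return "no_ocr_regions"
--     mask = 0
--     for item in associations:
--         s = str(item.get("association_status", ""))
--         if s == BLOCKED_NO_SYSTEM_STATUS:
--             mask |= 1
--         elif s.startswith("blocked_"):
--             mask |= 2
--         elif s == "assigned_to_measure":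
--             mask |= 4
--         else:
--             mask |= 8
--     if mask == 1:
--         return "blocked_no_system_association"
--     if mask & 12 == 0:
--         return "blocked_no_reliable_measure_geometry"
--     if mask & 4:
--         return "partially_assigned"
--     return "unassigned_pending_geometry_or_review"
-- ===== Notes on version B (the rewrite author's own statement) =====
-- stated objective: alternative
-- what changed: B classifies each item once into one of four disjoint categories via an elif chain, ORs the category bits into a mask in a single pass, and decodes the final label from the mask, instead of A's three separate short-circuiting scans each re-testing every item.
import Mathlib
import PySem

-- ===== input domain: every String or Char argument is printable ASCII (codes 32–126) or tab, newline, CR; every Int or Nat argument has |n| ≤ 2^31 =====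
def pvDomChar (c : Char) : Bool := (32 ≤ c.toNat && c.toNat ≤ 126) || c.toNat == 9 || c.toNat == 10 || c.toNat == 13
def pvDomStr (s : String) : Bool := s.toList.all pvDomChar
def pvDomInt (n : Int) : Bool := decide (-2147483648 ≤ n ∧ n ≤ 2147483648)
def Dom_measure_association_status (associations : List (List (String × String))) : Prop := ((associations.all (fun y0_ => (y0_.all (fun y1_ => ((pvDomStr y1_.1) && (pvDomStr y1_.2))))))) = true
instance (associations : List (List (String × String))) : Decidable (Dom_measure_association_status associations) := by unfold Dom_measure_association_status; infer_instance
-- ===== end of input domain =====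

-- B makes one pass classifying each item into a category bit, ORs the bits into a mask and
-- decodes the label from the mask; A makes three separate short-circuiting scans. Same cost.

-- ===== PORT A =====
-- item.get("association_status") = first-match lookup in the association list (none = missing key)
def measure_association_status (associations : List (List (String × String))) : String :=
  if associations.isEmpty then "no_ocr_regions"
  else if associations.all (fun item =>
      item.lookup "association_status" == some "blocked_no_system_association") then
    "blocked_no_system_association"
  else if associations.all (fun item =>
      PySem.Str.startswith ((item.lookup "association_status").getD "") "blocked_") then
    "blocked_no_reliable_measure_geometry"
  else if associations.any (fun item =>
      item.lookup "association_status" == some "assigned_to_measure") then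
    "partially_assigned"
  else "unassigned_pending_geometry_or_review"

-- ===== PORT B =====
-- per-item category bit: the elif chain of Source B
def pvCat (item : List (String × String)) : Int :=
  if (item.lookup "association_status").getD "" == "blocked_no_system_association" then 1
  else if PySem.Str.startswith ((item.lookup "association_status").getD "") "blocked_" then 2
  else if (item.lookup "association_status").getD "" == "assigned_to_measure" then 4
  else 8

def measure_association_status_alt (associations : List (List (String × String))) : String :=
  if associations.isEmpty then "no_ocr_regions"
  else
    let mask : Int := associations.foldl (fun m item => Int.lor m (pvCat item)) 0
    if mask == 1 then "blocked_no_system_association"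
    else if Int.land mask 12 == 0 then "blocked_no_reliable_measure_geometry"
    else if Int.land mask 4 != 0 then "partially_assigned"
    else "unassigned_pending_geometry_or_review"

-- ===== PRECONDITION & SPEC =====
def Spec_measure_association_status (associations : List (List (String × String))) (out : String) : Prop := out = measure_association_status_alt associations
instance (associations : List (List (String × String))) (out : String) : Decidable (Spec_measure_association_status associations out) := by unfold Spec_measure_association_status; infer_instance

-- ===== CLAIM (what is proved, stated in full; the proofs are below) =====
def Claim_equal_measure_association_status : Prop := ∀ (associations : List (List (String × String))), Dom_measure_association_status associations → Spec_measure_association_status associations (measure_association_status associations)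

-- ===== LEMMAS AND PROOFS =====

theorem pvCat_cases (item : List (String × String)) :
    pvCat item = 1 ∨ pvCat item = 2 ∨ pvCat item = 4 ∨ pvCat item = 8 := by
  unfold pvCat; split_ifs <;> simp

-- per-item bridges between A's predicates and B's categories
theorem cat_eq_one_iff (item : List (String × String)) :
    pvCat item = 1 ↔ (item.lookup "association_status" == some "blocked_no_system_association") = true := by
  unfold pvCat
  cases h : item.lookup "association_status" with
  | none => simp [Option.getD]; decide
  | some v =>
    simp only [Option.getD, beq_iff_eq, Option.some.injEq]
    split_ifs with h1 h2 h3 <;> simp_all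

theorem cat_le_two_iff (item : List (String × String)) :
    (pvCat item = 1 ∨ pvCat item = 2) ↔
      PySem.Str.startswith ((item.lookup "association_status").getD "") "blocked_" = true := by
  unfold pvCat
  split_ifs with h1 h2 h3
  · rw [beq_iff_eq] at h1; rw [h1]; decide
  · simp only [h2]; decide
  · simp only [Bool.not_eq_true] at h2; simp only [h2]; decide
  · simp only [Bool.not_eq_true] at h2; simp only [h2]; decide

theorem cat_eq_four_iff (item : List (String × String)) :
    pvCat item = 4 ↔ (item.lookup "association_status" == some "assigned_to_measure") = true := by
  unfold pvCat
  cases h : item.lookup "association_status" with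
  | none => decide
  | some v =>
    simp only [Option.getD_some, Option.some.injEq, beq_iff_eq]
    split_ifs with h1 h2 h3
    · rw [h1]; decide
    · constructor
      · intro hc; exact absurd hc (by decide)
      · intro hv; rw [hv] at h2; exact absurd h2 (by decide)
    · simp [h3]
    · constructor
      · intro hc; exact absurd hc (by decide)
      · intro hv; exact absurd hv h3

theorem or_exists_cons {α : Type} (P : Prop) (f : α → Prop) (hd : α) (tl : List α) :
    ((P ∨ f hd) ∨ ∃ i ∈ tl, f i) ↔ (P ∨ ∃ i ∈ hd :: tl, f i) := by
  simp only [List.mem_cons]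
  constructor
  · rintro ((h | h) | ⟨i, hi, hc⟩)
    · exact Or.inl h
    · exact Or.inr ⟨hd, Or.inl rfl, h⟩
    · exact Or.inr ⟨i, Or.inr hi, hc⟩
  · rintro (h | ⟨i, rfl | hi, hc⟩)
    · exact Or.inl (Or.inl h)
    · exact Or.inl (Or.inr hc)
    · exact Or.inr ⟨i, hi, hc⟩

-- one OR step on a mask in [0,16) with a category bit
theorem lor_step (m c : Int) (hm0 : 0 ≤ m) (hm : m < 16)
    (hc : c = 1 ∨ c = 2 ∨ c = 4 ∨ c = 8) :
    0 ≤ Int.lor m c ∧ Int.lor m c < 16 ∧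
    (Int.land (Int.lor m c) 1 ≠ 0 ↔ (Int.land m 1 ≠ 0 ∨ c = 1)) ∧
    (Int.land (Int.lor m c) 2 ≠ 0 ↔ (Int.land m 2 ≠ 0 ∨ c = 2)) ∧
    (Int.land (Int.lor m c) 4 ≠ 0 ↔ (Int.land m 4 ≠ 0 ∨ c = 4)) ∧
    (Int.land (Int.lor m c) 8 ≠ 0 ↔ (Int.land m 8 ≠ 0 ∨ c = 8)) := by
  interval_cases m <;> rcases hc with rfl | rfl | rfl | rfl <;> decide

-- invariant for the fold: bounds and per-bit characterization
theorem mask_char (l : List (List (String × String))) : ∀ (m : Int), 0 ≤ m → m < 16 →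
    let r := l.foldl (fun m item => Int.lor m (pvCat item)) m
    0 ≤ r ∧ r < 16 ∧
    (Int.land r 1 ≠ 0 ↔ (Int.land m 1 ≠ 0 ∨ ∃ i ∈ l, pvCat i = 1)) ∧
    (Int.land r 2 ≠ 0 ↔ (Int.land m 2 ≠ 0 ∨ ∃ i ∈ l, pvCat i = 2)) ∧
    (Int.land r 4 ≠ 0 ↔ (Int.land m 4 ≠ 0 ∨ ∃ i ∈ l, pvCat i = 4)) ∧
    (Int.land r 8 ≠ 0 ↔ (Int.land m 8 ≠ 0 ∨ ∃ i ∈ l, pvCat i = 8)) := by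
  induction l with
  | nil => intro m h0 h1; simp [h0, h1]
  | cons hd tl ih =>
    intro m h0 h1
    obtain ⟨s0, s1, b1, b2, b4, b8⟩ := lor_step m (pvCat hd) h0 h1 (pvCat_cases hd)
    obtain ⟨r0, r1, c1, c2, c4, c8⟩ := ih (Int.lor m (pvCat hd)) s0 s1
    simp only [List.foldl_cons]
    refine ⟨r0, r1, ?_, ?_, ?_, ?_⟩
    · rw [c1, b1]; exact or_exists_cons _ (fun i => pvCat i = 1) hd tl
    · rw [c2, b2]; exact or_exists_cons _ (fun i => pvCat i = 2) hd tl
    · rw [c4, b4]; exact or_exists_cons _ (fun i => pvCat i = 4) hd tl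
    · rw [c8, b8]; exact or_exists_cons _ (fun i => pvCat i = 8) hd tl

-- ===== VERDICT (by name: the statement is the Claim_ definition above) =====
theorem measure_association_status_spec : Claim_equal_measure_association_status := by
  intro associations _
  unfold Spec_measure_association_status measure_association_status measure_association_status_alt
  by_cases hnil : associations.isEmpty
  · simp [hnil]
  · have hne : associations ≠ [] := by simpa [List.isEmpty_iff] using hnil
    simp only [hnil, Bool.false_eq_true, if_false]
    obtain ⟨r0, r1, c1, c2, c4, c8⟩ := mask_char associations 0 (by decide) (by decide)
    set r := associations.foldl (fun m item => Int.lor m (pvCat item)) 0 with hr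
    simp only [(by decide : Int.land (0:Int) 1 ≠ 0 ↔ False), (by decide : Int.land (0:Int) 2 ≠ 0 ↔ False),
      (by decide : Int.land (0:Int) 4 ≠ 0 ↔ False), (by decide : Int.land (0:Int) 8 ≠ 0 ↔ False),
      false_or] at c1 c2 c4 c8
    -- translate each of B's mask tests into A's scans
    have e1 : (associations.all (fun item =>
        item.lookup "association_status" == some "blocked_no_system_association")) = (r == 1) := by
      rw [Bool.eq_iff_iff, List.all_eq_true, beq_iff_eq]
      have hbit : r = 1 ↔ (Int.land r 1 ≠ 0 ∧ ¬ Int.land r 2 ≠ 0 ∧ ¬ Int.land r 4 ≠ 0 ∧ ¬ Int.land r 8 ≠ 0) := by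
        clear_value r; interval_cases r <;> decide
      rw [hbit, c1, c2, c4, c8]
      constructor
      · intro hall
        rcases List.exists_mem_of_ne_nil associations hne with ⟨i0, hi0⟩
        refine ⟨⟨i0, hi0, (cat_eq_one_iff i0).mpr (hall i0 hi0)⟩, ?_, ?_, ?_⟩ <;>
          · rintro ⟨i, hi, hc⟩
            have := (cat_eq_one_iff i).mpr (hall i hi)
            omega
      · rintro ⟨_, h2, h4, h8⟩ i hi
        rcases pvCat_cases i with hc | hc | hc | hc
        · exact (cat_eq_one_iff i).mp hc
        · exact absurd ⟨i, hi, hc⟩ h2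
        · exact absurd ⟨i, hi, hc⟩ h4
        · exact absurd ⟨i, hi, hc⟩ h8
    have e2 : (associations.all (fun item =>
        PySem.Str.startswith ((item.lookup "association_status").getD "") "blocked_")) = (Int.land r 12 == 0) := by
      rw [Bool.eq_iff_iff, List.all_eq_true, beq_iff_eq]
      have hbit : Int.land r 12 = 0 ↔ (¬ Int.land r 4 ≠ 0 ∧ ¬ Int.land r 8 ≠ 0) := by
        clear_value r; interval_cases r <;> decide
      rw [hbit, c4, c8]
      constructor
      · intro hall
        constructor <;>
          · rintro ⟨i, hi, hc⟩
            have h12 := (cat_le_two_iff i).mpr (hall i hi)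
            omega
      · rintro ⟨h4, h8⟩ i hi
        rcases pvCat_cases i with hc | hc | hc | hc
        · exact (cat_le_two_iff i).mp (Or.inl hc)
        · exact (cat_le_two_iff i).mp (Or.inr hc)
        · exact absurd ⟨i, hi, hc⟩ h4
        · exact absurd ⟨i, hi, hc⟩ h8
    have e3 : (associations.any (fun item =>
        item.lookup "association_status" == some "assigned_to_measure")) = (Int.land r 4 != 0) := by
      rw [Bool.eq_iff_iff, List.any_eq_true, bne_iff_ne, c4]
      constructor
      · rintro ⟨i, hi, hc⟩; exact ⟨i, hi, (cat_eq_four_iff i).mpr hc⟩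
      · rintro ⟨i, hi, hc⟩; exact ⟨i, hi, (cat_eq_four_iff i).mp hc⟩
    rw [e1, e2, e3]
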